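-- pv_equiv track=rewrite | github.com/uspraveen/cosmic-memory | src/cosmic_memory/extraction/deterministic.py | _dedup_alias_values
-- ===== SOURCE A (Python) =====
-- def _clean_phrase(value: str) -> str:
--     cleaned = " ".join(value.split()).strip(" \t\r\n\"'")
--     return cleaned.rstrip(".,;:!?")
--
-- def _dedup_alias_values(values: list[str]) -> list[str]:
--     deduped: dict[str, str] = {}
--     for value in values:
--         normalized = _clean_phrase(value)
--         if not normalized:
--             continue
--         key = normalized.casefold()
--         existing = deduped.get(key)
--         if existing is None or len(normalized) > len(existing):
--             deduped[key] = normalized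
--     return list(deduped.values())
-- ===== SOURCE B (Python) =====
-- def _clean_phrase(value: str) -> str:
--     cleaned = " ".join(value.split()).strip(" \t\r\n\"'")
--     return cleaned.rstrip(".,;:!?")
--
-- def _dedup_alias_values(values: list[str]) -> list[str]:
--     cleaned = [_clean_phrase(v) for v in values]
--     result = []
--     seen = set()
--     for c in cleaned:
--         if not c:
--             continue
--         key = c.casefold()
--         if key in seen:
--             continue
--         seen.add(key)
--         best = c
--         for d in cleaned:
--             if d and d.casefold() == key and len(d) > len(best):
--                 best = d
--         result.append(best)
--     return result
-- ===== Notes on version B (the rewrite author's own statement) =====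
-- stated objective: alternative
-- what changed: Replaces A's single-pass dict that keeps a running longest alias per casefold key by a dict-free brute force: for each cleaned value that is the first occurrence of its casefold key, a nested scan over the whole cleaned list picks the first longest alias with that key.
import Mathlib
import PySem

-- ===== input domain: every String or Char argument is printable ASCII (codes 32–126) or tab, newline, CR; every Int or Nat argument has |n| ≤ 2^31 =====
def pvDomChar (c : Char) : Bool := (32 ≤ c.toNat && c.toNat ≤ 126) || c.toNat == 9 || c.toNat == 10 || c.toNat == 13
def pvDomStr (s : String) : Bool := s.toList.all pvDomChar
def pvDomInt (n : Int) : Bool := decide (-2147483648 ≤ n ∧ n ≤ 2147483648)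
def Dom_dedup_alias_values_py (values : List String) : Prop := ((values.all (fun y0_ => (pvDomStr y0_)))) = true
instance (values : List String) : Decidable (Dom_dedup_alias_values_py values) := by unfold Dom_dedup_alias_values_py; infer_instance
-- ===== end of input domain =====

-- B replaces A's dict keyed by casefold with a dict-free brute force: for each first
-- occurrence of a key, a nested scan over all cleaned values picks the first longest
-- alias with that key (same result, a different algorithm; no speed claim — B is quadratic).

-- exact port of str.rstrip(chars): drop trailing characters that occur in `chars`
def rstripChars (s chars : String) : String :=
  String.ofList ((s.toList.reverse.dropWhile (fun c => chars.toList.contains c)).reverse)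

-- port of _clean_phrase (shared verbatim by A and B)
def cleanPhrase (value : String) : String :=
  rstripChars (PySem.Str.stripChars (PySem.Str.join " " (PySem.Str.split₀ value)) " \t\r\n\"'") ".,;:!?"

-- ===== PORT A =====
-- loop body of A's for-loop; str.casefold = PySem.Str.lower, exact on the ASCII domain Dom_
def dedupStepA (deduped : PySem.Dict String String) (value : String) : PySem.Dict String String :=
  let normalized := cleanPhrase value
  if normalized = "" then deduped
  else
    let key := PySem.Str.lower normalized
    match deduped.get? key with
    | none => deduped.insert key normalized
    | some existing =>
        if PySem.Str.len normalized > PySem.Str.len existing then deduped.insert key normalized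
        else deduped

def dedup_alias_values_py (values : List String) : List String :=
  (values.foldl dedupStepA PySem.Dict.empty).values

-- ===== PORT B =====
-- body of B's inner loop: 'if d and d.casefold() == key and len(d) > len(best): best = d'
def innerStepB (key : String) (best d : String) : String :=
  if d ≠ "" ∧ PySem.Str.lower d = key ∧ PySem.Str.len d > PySem.Str.len best then d else best

-- body of B's outer loop over `cleaned`; state = (seen, result)
def outerStepB (cleaned : List String) (st : PySem.Set String × List String) (c : String) :
    PySem.Set String × List String :=
  if c = "" then st
  else
    let key := PySem.Str.lower c
    if PySem.Set.contains st.1 key then st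
    else (PySem.Set.add st.1 key, st.2 ++ [cleaned.foldl (innerStepB key) c])

def dedup_alias_values_py_alt (values : List String) : List String :=
  let cleaned := values.map cleanPhrase
  (cleaned.foldl (outerStepB cleaned) (PySem.Set.empty, [])).2

-- ===== PRECONDITION & SPEC =====
def Spec_dedup_alias_values_py (values : List String) (out : List String) : Prop := out = dedup_alias_values_py_alt values
instance (values : List String) (out : List String) : Decidable (Spec_dedup_alias_values_py values out) := by unfold Spec_dedup_alias_values_py; infer_instance

-- ===== CLAIM (what is proved, stated in full; the proofs are below) =====
def Claim_equal_dedup_alias_values_py : Prop := ∀ (values : List String), Dom_dedup_alias_values_py values → Spec_dedup_alias_values_py values (dedup_alias_values_py values)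

-- ===== LEMMAS AND PROOFS =====

def lowS (s : String) : String := PySem.Str.lower s

-- the nonempty cleaned values, in order: the sequence both loops actually process
def csOf (values : List String) : List String := (values.map cleanPhrase).filter (fun c => c != "")

-- A's loop body once cleaning and the empty-skip are factored out
def astepD (d : PySem.Dict String String) (n : String) : PySem.Dict String String :=
  match d.get? (lowS n) with
  | none => d.insert (lowS n) n
  | some e => if PySem.Str.len n > PySem.Str.len e then d.insert (lowS n) n else d

-- reference step of A's loop body on raw item lists
def repA (k n : String) : List (String × String) → List (String × String)
  | [] => [(k, n)]
  | p :: L =>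
      if p.1 == k then
        (if PySem.Str.len n > PySem.Str.len p.2 then (k, n) :: L else p :: L)
      else p :: repA k n L

def astepL (L : List (String × String)) (n : String) : List (String × String) :=
  repA (lowS n) n L

-- B's inner-loop body with the empty-string guard stripped (it never fires on csOf)
def bstep (key b d : String) : String :=
  if lowS d = key ∧ PySem.Str.len d > PySem.Str.len b then d else b

-- B's outer-loop body on csOf, with the inner scan also over csOf
def bstepOuter (cs0 : List String) (st : PySem.Set String × List String) (c : String) :
    PySem.Set String × List String :=
  if PySem.Set.contains st.1 (lowS c) then st
  else (PySem.Set.add st.1 (lowS c), st.2 ++ [cs0.foldl (bstep (lowS c)) c])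

-- per-key view of A's loop: the stored value for key k evolves by ostep
def ostep (k : String) (acc : Option String) (n : String) : Option String :=
  if lowS n = k then
    match acc with
    | none => some n
    | some e => if PySem.Str.len n > PySem.Str.len e then some n else some e
  else acc

def getVal (k : String) (L : List (String × String)) : Option String :=
  (L.find? (fun p => p.1 == k)).map Prod.snd

theorem getVal_nil (k : String) : getVal k [] = none := rfl

-- first-occurrence key accumulation (A's key order)
def focc (ks : List String) (k : String) : List String := if k ∈ ks then ks else ks ++ [k]

-- keys not yet seen, in first-occurrence order (B's key order)
def nk (prev : List String) : List String → List String
  | [] => []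
  | k :: r => if k ∈ prev then nk prev r else k :: nk (k :: prev) r

-- a loop that skips exactly the elements filtered out is a loop over the filter
theorem foldl_skip_filter {α β : Type} (p : α → Bool) (f g : β → α → β)
    (hg : ∀ b x, g b x = if p x then f b x else b) :
    ∀ (l : List α) (b : β), l.foldl g b = (l.filter p).foldl f b := by
  intro l
  induction l with
  | nil => intro b; rfl
  | cons x l ih =>
      intro b
      by_cases hx : p x = true
      · simp [hx, hg, ih]
      · simp only [Bool.not_eq_true] at hx
        simp [hx, hg, ih]

-- ===== A-side reduction =====

theorem astepD_items (n : String) (M : List (String × String))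
    (hnd : (M.map Prod.fst).Nodup) :
    (astepD (PySem.Dict.mk M) n).items = astepL M n := by
  show (match (PySem.Dict.mk M).get? (lowS n) with
    | none => (PySem.Dict.mk M).insert (lowS n) n
    | some e =>
        if PySem.Str.len n > PySem.Str.len e then (PySem.Dict.mk M).insert (lowS n) n
        else PySem.Dict.mk M).items = repA (lowS n) n M
  generalize lowS n = k
  induction M with
  | nil => simp [PySem.Dict.get?, PySem.Dict.insert, PySem.Dict.contains, repA]
  | cons p M ih =>
      have hnd' : (M.map Prod.fst).Nodup := hnd.of_cons
      by_cases hk : p.1 = k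
      · have hknot : ∀ q ∈ M, ¬(q.1 = k) := by
          intro q hq hqk
          exact (List.nodup_cons.mp hnd).1 (by rw [hk, ← hqk]; exact List.mem_map_of_mem hq)
        have hmap : M.map (fun q => if q.1 = k then (k, n) else q) = M := by
          conv_rhs => rw [← List.map_id M]
          exact List.map_congr_left (fun q hq => by simp [hknot q hq])
        simp only [repA, hk, beq_self_eq_true, if_true]
        simp [PySem.Dict.get?, PySem.Dict.insert, PySem.Dict.contains, hk, hmap]
        split_ifs <;> rfl
      · have hne : (p.1 == k) = false := by simp [hk]
        simp only [repA, hne, Bool.false_eq_true, if_false]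
        rw [← ih hnd']
        simp only [PySem.Dict.get?, List.find?_cons, hne]
        cases hg : List.find? (fun q => q.1 == k) M with
        | none =>
            have hcon : (PySem.Dict.mk (p :: M)).contains k = false := by
              simp only [PySem.Dict.contains, List.any_cons, hne, Bool.false_or]
              rw [List.any_eq_false]
              intro q hq
              simpa using List.find?_eq_none.mp hg q hq
            have hconM : (PySem.Dict.mk M).contains k = false := by
              simp only [PySem.Dict.contains]
              rw [List.any_eq_false]
              intro q hq
              simpa using List.find?_eq_none.mp hg q hq
            simp [PySem.Dict.insert, hcon, hconM]
        | some q =>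
            have hq1 : (q.1 == k) = true := by
              have := List.find?_some hg; simpa using this
            have hcon : (PySem.Dict.mk (p :: M)).contains k = true := by
              simp only [PySem.Dict.contains, List.any_cons, hne, Bool.false_or]
              exact List.any_eq_true.mpr ⟨q, List.mem_of_find?_eq_some hg, hq1⟩
            have hconM : (PySem.Dict.mk M).contains k = true := by
              simp only [PySem.Dict.contains]
              exact List.any_eq_true.mpr ⟨q, List.mem_of_find?_eq_some hg, hq1⟩
            simp only [Option.map_some]
            split_ifs <;> simp [PySem.Dict.insert, hcon, hconM, hk]

theorem repA_keys (k n : String) (L : List (String × String)) :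
    (repA k n L).map Prod.fst =
      if k ∈ L.map Prod.fst then L.map Prod.fst else L.map Prod.fst ++ [k] := by
  induction L with
  | nil => simp [repA]
  | cons p L ih =>
      by_cases hk : p.1 = k
      · have hmem : k ∈ (p :: L).map Prod.fst := by simp [← hk]
        simp only [repA, hk, beq_self_eq_true, if_true]
        rw [if_pos hmem]
        split_ifs with h1 <;> simp [hk]
      · have : ¬ k = p.1 := fun h => hk h.symm
        simp only [repA, List.map_cons]
        rw [if_neg (by simp [hk]), List.map_cons, ih]
        simp only [List.mem_cons, this, false_or]
        split_ifs <;> simp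

theorem repA_nodup (k n : String) (L : List (String × String))
    (hnd : (L.map Prod.fst).Nodup) : ((repA k n L).map Prod.fst).Nodup := by
  rw [repA_keys]
  split_ifs with h
  · exact hnd
  · refine hnd.append (List.nodup_singleton k) ?_
    intro a ha hb
    simp only [List.mem_singleton] at hb
    subst hb
    exact h ha

theorem foldA_items : ∀ (l : List String) (M : List (String × String)),
    (M.map Prod.fst).Nodup →
    (l.foldl astepD (PySem.Dict.mk M)).items = l.foldl astepL M := by
  intro l
  induction l with
  | nil => intro M _; rfl
  | cons n l ih =>
      intro M hnd
      have hstep : astepD (PySem.Dict.mk M) n = PySem.Dict.mk (astepL M n) := by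
        apply PySem.Dict.ext
        exact astepD_items n M hnd
      simp only [List.foldl_cons, hstep]
      exact ih (astepL M n) (by unfold astepL; exact repA_nodup _ _ _ hnd)

theorem getVal_repA (k h n : String) (L : List (String × String)) :
    getVal k (repA h n L) =
      if h = k then
        (match getVal k L with
          | none => some n
          | some e => if PySem.Str.len n > PySem.Str.len e then some n else some e)
      else getVal k L := by
  induction L with
  | nil =>
      by_cases hk : h = k
      · simp [repA, getVal, List.find?, hk]
      · have hb : (h == k) = false := by simp [hk]
        simp [repA, getVal, List.find?, hb, hk]
  | cons p L ih =>
      by_cases hp : p.1 = h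
      · simp only [repA, hp, beq_self_eq_true, if_true]
        by_cases hk : h = k
        · subst hk
          have hfind : getVal h (p :: L) = some p.2 := by simp [getVal, List.find?, hp]
          rw [if_pos rfl, hfind]
          show getVal h (if PySem.Str.len n > PySem.Str.len p.2 then (h, n) :: L else p :: L)
            = if PySem.Str.len n > PySem.Str.len p.2 then some n else some p.2
          split_ifs with hlen
          · simp [getVal, List.find?]
          · exact hfind
        · have h1 : (p.1 == k) = false := by simp [hp, hk]
          have h2 : (h == k) = false := by simp [hk]
          rw [if_neg hk]
          split_ifs with hlen
          · simp [getVal, List.find?, h1, h2]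
          · rfl
      · have hpf : (p.1 == h) = false := by simp [hp]
        simp only [repA, hpf, Bool.false_eq_true, if_false]
        by_cases hpk : p.1 = k
        · have hk : ¬ h = k := by intro e; exact hp (by rw [hpk, e])
          have h1 : (p.1 == k) = true := by simp [hpk]
          simp [getVal, List.find?, h1, hk]
        · have h1 : (p.1 == k) = false := by simp [hpk]
          simp only [getVal, List.find?, h1] at ih ⊢
          exact ih

theorem getVal_astepL (k n : String) (L : List (String × String)) :
    getVal k (astepL L n) = ostep k (getVal k L) n := by
  unfold astepL ostep
  rw [getVal_repA]

theorem getVal_foldl (k : String) : ∀ (l : List String) (L : List (String × String)),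
    getVal k (l.foldl astepL L) = l.foldl (ostep k) (getVal k L) := by
  intro l
  induction l with
  | nil => intro L; rfl
  | cons n l ih => intro L; simp only [List.foldl_cons, ih, getVal_astepL]

theorem keys_astepL (n : String) (L : List (String × String)) :
    (astepL L n).map Prod.fst = focc (L.map Prod.fst) (lowS n) := by
  unfold astepL focc
  rw [repA_keys]

theorem keys_foldl : ∀ (l : List String) (L : List (String × String)),
    (l.foldl astepL L).map Prod.fst = (l.map lowS).foldl focc (L.map Prod.fst) := by
  intro l
  induction l with
  | nil => intro L; rfl
  | cons n l ih => intro L; simp only [List.foldl_cons, List.map_cons, ih, keys_astepL]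

theorem focc_nodup : ∀ (l ks : List String), ks.Nodup → (l.foldl focc ks).Nodup := by
  intro l
  induction l with
  | nil => intro ks h; exact h
  | cons k l ih =>
      intro ks h
      refine ih _ ?_
      unfold focc
      split_ifs with hk
      · exact h
      · refine h.append (List.nodup_singleton k) ?_
        intro a ha hb
        simp only [List.mem_singleton] at hb
        subst hb
        exact hk ha

theorem map_snd_eq : ∀ (L : List (String × String)), (L.map Prod.fst).Nodup →
    L.map Prod.snd = (L.map Prod.fst).map (fun k => (getVal k L).getD "") := by
  intro L
  induction L with
  | nil => intro _; rfl
  | cons p L ih =>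
      intro hnd
      have hp : p.1 ∉ L.map Prod.fst := by
        simpa using (List.nodup_cons.mp hnd).1
      have hhead : getVal p.1 (p :: L) = some p.2 := by simp [getVal, List.find?]
      have htail : (L.map Prod.fst).map (fun k => (getVal k (p :: L)).getD "")
          = (L.map Prod.fst).map (fun k => (getVal k L).getD "") := by
        apply List.map_congr_left
        intro k hk
        have hne : (p.1 == k) = false := by
          simp only [beq_eq_false_iff_ne, ne_eq]
          intro e; exact hp (e ▸ hk)
        simp [getVal, List.find?, hne]
      simp only [List.map_cons, hhead, Option.getD_some, htail]
      rw [ih hnd.of_cons]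

-- ===== B-side reduction =====

theorem bstep_skip (k : String) : ∀ (l : List String) (b : String),
    (∀ d ∈ l, lowS d ≠ k) → l.foldl (bstep k) b = b := by
  intro l
  induction l with
  | nil => intro b _; rfl
  | cons d l ih =>
      intro b h
      have hd : lowS d ≠ k := h d (by simp)
      simp only [List.foldl_cons]
      rw [show bstep k b d = b from by simp [bstep, hd]]
      exact ih b (fun x hx => h x (by simp [hx]))

theorem ostep_skip (k : String) : ∀ (l : List String) (acc : Option String),
    (∀ d ∈ l, lowS d ≠ k) → l.foldl (ostep k) acc = acc := by
  intro l
  induction l with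
  | nil => intro acc _; rfl
  | cons d l ih =>
      intro acc h
      have hd : lowS d ≠ k := h d (by simp)
      simp only [List.foldl_cons]
      rw [show ostep k acc d = acc from by simp [ostep, hd]]
      exact ih acc (fun x hx => h x (by simp [hx]))

theorem ostep_some (k : String) : ∀ (l : List String) (b : String),
    l.foldl (ostep k) (some b) = some (l.foldl (bstep k) b) := by
  intro l
  induction l with
  | nil => intro b; rfl
  | cons d l ih =>
      intro b
      simp only [List.foldl_cons]
      rw [show ostep k (some b) d = some (bstep k b d) from by
        by_cases hd : lowS d = k <;> simp [ostep, bstep, hd, apply_ite some]]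
      exact ih (bstep k b d)

theorem best_eq (k c : String) (done r : List String)
    (hdone : ∀ d ∈ done, lowS d ≠ k) (hc : lowS c = k) :
    (done ++ c :: r).foldl (bstep k) c = ((done ++ c :: r).foldl (ostep k) none).getD "" := by
  rw [List.foldl_append, List.foldl_append, bstep_skip k done c hdone,
      ostep_skip k done none hdone]
  simp only [List.foldl_cons]
  rw [show ostep k none c = some c from by simp [ostep, hc],
      show bstep k c c = c from by simp [bstep],
      ostep_some]
  rfl

theorem nk_congr : ∀ (l p1 p2 : List String), (∀ x, x ∈ p1 ↔ x ∈ p2) → nk p1 l = nk p2 l := by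
  intro l
  induction l with
  | nil => intro p1 p2 _; rfl
  | cons k r ih =>
      intro p1 p2 h
      simp only [nk]
      by_cases hk : k ∈ p1
      · rw [if_pos hk, if_pos ((h k).mp hk)]
        exact ih p1 p2 h
      · rw [if_neg hk, if_neg (fun e => hk ((h k).mpr e))]
        have : ∀ x, x ∈ k :: p1 ↔ x ∈ k :: p2 := by
          intro x; simp [h x]
        rw [ih (k :: p1) (k :: p2) this]

theorem nk_focc : ∀ (l ks prev : List String), (∀ x, x ∈ prev ↔ x ∈ ks) →
    ks ++ nk prev l = l.foldl focc ks := by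
  intro l
  induction l with
  | nil => intro ks prev _; simp [nk]
  | cons k r ih =>
      intro ks prev h
      simp only [List.foldl_cons, nk]
      by_cases hk : k ∈ prev
      · rw [if_pos hk, show focc ks k = ks from by unfold focc; rw [if_pos ((h k).mp hk)]]
        exact ih ks prev h
      · have hks : k ∉ ks := fun e => hk ((h k).mpr e)
        rw [if_neg hk, show focc ks k = ks ++ [k] from by unfold focc; rw [if_neg hks]]
        rw [List.append_cons]
        refine ih (ks ++ [k]) (k :: prev) ?_
        intro x
        simp [h x, or_comm]

theorem outer_inv (cs0 : List String) : ∀ (rest done : List String)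
    (seen : PySem.Set String) (out : List String),
    cs0 = done ++ rest →
    (∀ k, PySem.Set.contains seen k = true ↔ k ∈ done.map lowS) →
    (rest.foldl (bstepOuter cs0) (seen, out)).2
      = out ++ (nk (done.map lowS) (rest.map lowS)).map
          (fun k => ((cs0.foldl (ostep k) none).getD "")) := by
  intro rest
  induction rest with
  | nil => intro done seen out _ _; simp [nk]
  | cons c r ih =>
      intro done seen out hcs hseen
      simp only [List.foldl_cons, List.map_cons]
      by_cases hk : PySem.Set.contains seen (lowS c) = true
      · have hmem : lowS c ∈ done.map lowS := (hseen _).mp hk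
        have hks : lowS c ∈ seen := (PySem.Set.contains_iff seen (lowS c)).mp hk
        rw [show bstepOuter cs0 (seen, out) c = (seen, out) from by
          simp [bstepOuter, hks]]
        simp only [nk, if_pos hmem]
        have hcs' : cs0 = (done ++ [c]) ++ r := by rw [hcs, List.append_assoc]; rfl
        have hseen' : ∀ k, PySem.Set.contains seen k = true ↔ k ∈ (done ++ [c]).map lowS := by
          intro k
          rw [hseen]
          simp only [List.map_append, List.mem_append, List.map_cons, List.map_nil,
            List.mem_singleton]
          constructor
          · exact Or.inl
          · rintro (h | h)
            · exact h
            · simpa [h] using hmem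
        rw [ih (done ++ [c]) seen out hcs' hseen']
        congr 2
        apply nk_congr
        intro x
        simp only [List.map_append, List.mem_append, List.map_cons, List.map_nil,
          List.mem_singleton]
        constructor
        · rintro (h | h)
          · exact h
          · simpa [h] using hmem
        · exact Or.inl
      · have hmem : lowS c ∉ done.map lowS := fun h => hk ((hseen _).mpr h)
        have hkf : PySem.Set.contains seen (lowS c) = false := by
          simpa using hk
        have hks : lowS c ∉ seen := fun m => hk ((PySem.Set.contains_iff seen (lowS c)).mpr m)
        rw [show bstepOuter cs0 (seen, out) c
            = (PySem.Set.add seen (lowS c), out ++ [cs0.foldl (bstep (lowS c)) c]) from by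
          simp [bstepOuter, hks]]
        simp only [nk, if_neg hmem]
        have hdone : ∀ d ∈ done, lowS d ≠ lowS c := by
          intro d hd e
          exact hmem (e ▸ List.mem_map_of_mem hd)
        have hbest : cs0.foldl (bstep (lowS c)) c = (cs0.foldl (ostep (lowS c)) none).getD "" := by
          rw [hcs]
          exact best_eq (lowS c) c done r hdone rfl
        have hcs' : cs0 = (done ++ [c]) ++ r := by rw [hcs, List.append_assoc]; rfl
        have hseen' : ∀ k, PySem.Set.contains (PySem.Set.add seen (lowS c)) k = true
            ↔ k ∈ (done ++ [c]).map lowS := by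
          intro k
          rw [PySem.Set.contains_iff, PySem.Set.mem_add]
          simp only [List.map_append, List.mem_append, List.map_cons, List.map_nil,
            List.mem_singleton]
          constructor
          · rintro (h | h)
            · exact Or.inl ((hseen k).mp ((PySem.Set.contains_iff seen k).mpr h))
            · exact Or.inr h
          · rintro (h | h)
            · exact Or.inl ((PySem.Set.contains_iff seen k).mp ((hseen k).mpr h))
            · exact Or.inr h
        rw [ih (done ++ [c]) (PySem.Set.add seen (lowS c))
            (out ++ [cs0.foldl (bstep (lowS c)) c]) hcs' hseen']
        rw [hbest]
        rw [show nk ((done ++ [c]).map lowS) (r.map lowS)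
            = nk (lowS c :: done.map lowS) (r.map lowS) from by
          apply nk_congr; intro x; simp [or_comm]]
        simp [List.append_assoc]

-- the common closed form both programs reach
theorem hA_eq (values : List String) :
    dedup_alias_values_py values
      = (((csOf values).map lowS).foldl focc []).map
          (fun k => (((csOf values).foldl (ostep k) none).getD "")) := by
  have e1 : values.foldl dedupStepA PySem.Dict.empty
      = (csOf values).foldl astepD PySem.Dict.empty := by
    have hfun : values.foldl dedupStepA PySem.Dict.empty
        = (values.map cleanPhrase).foldl
            (fun d n => if n = "" then d else astepD d n) PySem.Dict.empty := by
      rw [List.foldl_map]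
      rfl
    rw [hfun]
    exact foldl_skip_filter (fun c => c != "") astepD _
      (by intro b x; by_cases hx : x = "" <;> simp [hx]) _ _
  have e2 : ((csOf values).foldl astepD PySem.Dict.empty).items
      = (csOf values).foldl astepL [] := foldA_items (csOf values) [] (by simp)
  have hnd : (((csOf values).foldl astepL []).map Prod.fst).Nodup := by
    rw [keys_foldl]
    exact focc_nodup _ _ (by simp)
  unfold dedup_alias_values_py
  show ((values.foldl dedupStepA PySem.Dict.empty).items).map Prod.snd = _
  rw [e1, e2, map_snd_eq _ hnd, keys_foldl]
  simp only [getVal_foldl, getVal_nil, List.map_nil]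

theorem hB_eq (values : List String) :
    dedup_alias_values_py_alt values
      = (((csOf values).map lowS).foldl focc []).map
          (fun k => (((csOf values).foldl (ostep k) none).getD "")) := by
  have hinner : ∀ (key : String) (b : String),
      (values.map cleanPhrase).foldl (innerStepB key) b
        = (csOf values).foldl (bstep key) b := by
    intro key b
    exact foldl_skip_filter (fun c => c != "") (bstep key) _
      (by
        intro b d
        by_cases hd : d = "" <;> simp [innerStepB, bstep, lowS, hd]) _ _
  have e1 : (values.map cleanPhrase).foldl (outerStepB (values.map cleanPhrase))
        (PySem.Set.empty, [])
      = (csOf values).foldl (bstepOuter (csOf values)) (PySem.Set.empty, []) := by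
    exact foldl_skip_filter (fun c => c != "")
      (bstepOuter (csOf values)) _
      (by
        intro st c
        by_cases hc : c = ""
        · simp [outerStepB, hc]
        · have hb : (c != "") = true := by simp [hc]
          rw [if_pos hb]
          unfold outerStepB bstepOuter lowS
          rw [if_neg hc]
          simp [hinner]) _ _
  have hempty : ∀ k, PySem.Set.contains (PySem.Set.empty : PySem.Set String) k = true
      ↔ k ∈ (([] : List String).map lowS) := by
    intro k
    rw [PySem.Set.contains_iff]
    simp [PySem.Set.empty]
  unfold dedup_alias_values_py_alt
  show ((values.map cleanPhrase).foldl (outerStepB (values.map cleanPhrase))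
      (PySem.Set.empty, [])).2 = _
  rw [e1, outer_inv (csOf values) (csOf values) [] PySem.Set.empty [] rfl hempty]
  rw [show nk (([] : List String).map lowS) ((csOf values).map lowS)
      = ((csOf values).map lowS).foldl focc [] from by
    have := nk_focc ((csOf values).map lowS) [] [] (by intro x; rfl)
    simpa using this]
  simp

-- ===== VERDICT (by name: the statement is the Claim_ definition above) =====
theorem dedup_alias_values_py_spec : Claim_equal_dedup_alias_values_py := by
  intro values _
  unfold Spec_dedup_alias_values_py
  rw [hA_eq, hB_eq]
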